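-- pv_equiv track=rewrite | github.com/baudren/advent-of-code | 2024/day24.py | build_actual_chain
-- ===== SOURCE A (Python) =====
-- def build_actual_chain(rev_operators, output):
--     if output in rev_operators:
--         w1, op, w2 = rev_operators[output]
--         if not w1.startswith('x') and not w1.startswith('y'):
--             a = build_actual_chain(rev_operators, w1)
--         else:
--             a = w1
--         if not w2.startswith('x') and not w2.startswith('y'):
--             b = build_actual_chain(rev_operators, w2)
--         else:
--             b = w2
--         if a.startswith('x') or b.startswith('x'):
--             num = int(a[1:])
--             s = f"{num:2d}{op}"
--         else:
--             s = f"({a} {rev_operators[output][1]} {b})"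
--         return s
--     else:
--         return output
-- ===== SOURCE B (Python) =====
-- def build_actual_chain(rev_operators, output):
--     # Memoized DAG traversal: each wire's expression is computed once and
--     # cached, instead of re-expanding shared subtrees exponentially.
--     memo = {}
--
--     def expr(w):
--         if w in memo:
--             return memo[w]
--         if w not in rev_operators:
--             return w
--         w1, op, w2 = rev_operators[w]
--         a = w1 if (w1.startswith('x') or w1.startswith('y')) else expr(w1)
--         b = w2 if (w2.startswith('x') or w2.startswith('y')) else expr(w2)
--         if a.startswith('x') or b.startswith('x'):
--             s = f"{int(a[1:]):2d}{op}"
--         else: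
--             s = f"({a} {op} {b})"
--         memo[w] = s
--         return s
--
--     return expr(output)
-- ===== Notes on version B (the rewrite author's own statement) =====
-- stated objective: alternative
-- what changed: B computes each wire's expression once, caching it in a dict keyed by wire (memoized DAG traversal threading a memo), where A re-expands a shared subtree every time a path reaches it.
-- outside the precondition, e.g. on build_actual_chain({'g': ('x5', '', 'q'), 'z': ('g', 'AND', 'x1')}, 'z'): A returns ' 5AND', B returns ' 5AND'
import Mathlib
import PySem

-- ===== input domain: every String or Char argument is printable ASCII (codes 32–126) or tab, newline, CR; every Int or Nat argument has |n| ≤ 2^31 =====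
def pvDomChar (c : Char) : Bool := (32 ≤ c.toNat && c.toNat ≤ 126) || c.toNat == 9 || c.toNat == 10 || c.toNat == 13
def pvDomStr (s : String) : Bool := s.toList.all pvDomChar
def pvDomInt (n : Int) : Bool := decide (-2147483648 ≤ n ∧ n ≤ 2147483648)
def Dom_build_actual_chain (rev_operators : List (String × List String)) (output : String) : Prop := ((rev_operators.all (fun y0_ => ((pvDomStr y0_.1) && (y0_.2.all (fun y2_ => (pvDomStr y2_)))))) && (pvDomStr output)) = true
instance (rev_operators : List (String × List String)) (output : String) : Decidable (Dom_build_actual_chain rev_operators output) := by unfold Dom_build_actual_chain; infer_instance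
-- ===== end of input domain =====

-- B memoizes each wire's expression in a dict (DAG dynamic programming) so every gate
-- is expanded once, where A re-expands a shared subtree once per path reaching it
-- (objective: alternative). Equivalence of the RETURN value is proved on Pre_ below.

-- ===== PORT A =====
-- f"{n:2d}": str(n) right-justified to width 2 with spaces (exact for ints)
def pvFmt2d (n : Int) : String :=
  let r := PySem.Int.toStr n
  if r.length < 2 then String.ofList (List.replicate (2 - r.length) ' ') ++ r else r

-- literal port of A; the recursion is guarded by fuel (enough under Pre_'s acyclicity)
def goA (L : List (String × List String)) : Nat → String → String
  | 0, output => output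
  | fuel+1, output =>
    match (PySem.Dict.mk L).get? output with          -- 'output in rev_operators' / 'rev_operators[output]'
    | some v =>
      match v with
      | [w1, op, w2] =>                               -- 'w1, op, w2 = rev_operators[output]'
        let a := if !(PySem.Str.startswith w1 "x") && !(PySem.Str.startswith w1 "y") then goA L fuel w1 else w1
        let b := if !(PySem.Str.startswith w2 "x") && !(PySem.Str.startswith w2 "y") then goA L fuel w2 else w2
        if PySem.Str.startswith a "x" || PySem.Str.startswith b "x" then
          -- num = int(a[1:]); s = f"{num:2d}{op}"  (parse succeeds under Pre_)
          pvFmt2d ((PySem.Int.ofStr? (PySem.Str.slice a (some 1) none)).getD 0) ++ op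
        else
          -- s = f"({a} {rev_operators[output][1]} {b})": the second lookup returns the same v
          "(" ++ a ++ " " ++ (v.getD 1 "") ++ " " ++ b ++ ")"
      | _ => output                                   -- unpacking raises ValueError in Python: outside Pre_
    | none => output

def build_actual_chain (rev_operators : List (String × List String)) (output : String) : String :=
  goA rev_operators (rev_operators.length + 1) output

-- ===== PORT B =====
-- literal port of B: the recursion threads the memo dict; fuel as in A's port
def goB (L : List (String × List String)) : Nat → String → PySem.Dict String String → String × PySem.Dict String String
  | 0, w, memo => (w, memo)
  | fuel+1, w, memo =>
    match memo.get? w with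
    | some s => (s, memo)                             -- 'if w in memo: return memo[w]'
    | none =>
      match (PySem.Dict.mk L).get? w with
      | some [w1, op, w2] =>
        let p1 := if PySem.Str.startswith w1 "x" || PySem.Str.startswith w1 "y" then (w1, memo) else goB L fuel w1 memo
        let p2 := if PySem.Str.startswith w2 "x" || PySem.Str.startswith w2 "y" then (w2, p1.2) else goB L fuel w2 p1.2
        let s := if PySem.Str.startswith p1.1 "x" || PySem.Str.startswith p2.1 "x" then
            pvFmt2d ((PySem.Int.ofStr? (PySem.Str.slice p1.1 (some 1) none)).getD 0) ++ op
          else "(" ++ p1.1 ++ " " ++ op ++ " " ++ p2.1 ++ ")"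
        (s, p2.2.insert w s)                          -- 'memo[w] = s; return s'
      | some _ => (w, memo)                           -- unpacking raises in Python: outside Pre_
      | none => (w, memo)                             -- 'if w not in rev_operators: return w'

def build_actual_chain_alt (rev_operators : List (String × List String)) (output : String) : String :=
  (goB rev_operators (rev_operators.length + 1) output PySem.Dict.empty).1

-- ===== PRECONDITION & SPEC =====
-- pvIsEdge L v: A's recursion actually descends into wire v (v is a gate key not named x…/y…)
def pvIsEdge (L : List (String × List String)) (v : String) : Bool :=
  !(PySem.Str.startswith v "x") && !(PySem.Str.startswith v "y") && ((PySem.Dict.mk L).get? v).isSome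

-- the wires A's recursion steps into from w
def succs (L : List (String × List String)) (w : String) : List String :=
  match (PySem.Dict.mk L).get? w with
  | some [w1, _, w2] => [w1, w2].filter (pvIsEdge L)
  | _ => []

-- wires reachable from w in at most k recursion steps
def reachUpTo (L : List (String × List String)) : Nat → String → List String
  | 0, _ => []
  | k+1, w => ((succs L w).flatMap (fun v => v :: reachUpTo L k v)).dedup

-- all wires A's recursion visits starting from output (L.length steps reach everything)
def Rset (L : List (String × List String)) (output : String) : List String :=
  output :: reachUpTo L L.length output

-- a gate value A can evaluate without raising: a 3-list whose int() parses succeed when the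
-- numeric branch fires (w2 x-prefixed with a non-x/y key as w1 is excluded: there parseability
-- depends on the recursively built string, not on the input shape)
def GoodEntry (L : List (String × List String)) (v : List String) : Bool :=
  (v.length == 3) &&
  (!(PySem.Str.startswith (v.getD 0 "") "x" ||
      (PySem.Str.startswith (v.getD 2 "") "x" && PySem.Str.startswith (v.getD 0 "") "y")) ||
    (PySem.Int.ofStr? (PySem.Str.slice (v.getD 0 "") (some 1) none)).isSome) &&
  (!(PySem.Str.startswith (v.getD 2 "") "x" && !(PySem.Str.startswith (v.getD 0 "") "x") &&
      !(PySem.Str.startswith (v.getD 0 "") "y")) ||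
    (!((PySem.Dict.mk L).get? (v.getD 0 "")).isSome &&
      (PySem.Int.ofStr? (PySem.Str.slice (v.getD 0 "") (some 1) none)).isSome))

-- Pre_ excludes exactly inputs where Python A raises — a cycle reachable from output
-- (RecursionError), a reachable entry whose value is not a 3-list (unpacking ValueError), or an
-- unparsable int where the numeric branch fires (ValueError) — plus two conservative exclusions:
-- association lists with duplicate keys (they represent the Python dict argument ambiguously:
-- the dict overwrites, the assoc list looks up the first match), and reachable entries whose
-- second operand is x-prefixed while the first is a non-x/y key, where whether int() raises
-- depends on the recursively built string rather than on the input (A returns there only in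
-- degenerate cases such as purely numeric operator names, and B agrees with A on those too).
def Pre_build_actual_chain (rev_operators : List (String × List String)) (output : String) : Prop :=
  ((PySem.Dict.mk rev_operators).get? output = none) ∨
  ((rev_operators.map Prod.fst).Nodup ∧
    ∀ v ∈ Rset rev_operators output,
      (∀ val, (PySem.Dict.mk rev_operators).get? v = some val → GoodEntry rev_operators val = true) ∧
      v ∉ reachUpTo rev_operators rev_operators.length v)

instance (rev_operators : List (String × List String)) (output : String) : Decidable (Pre_build_actual_chain rev_operators output) := by
  unfold Pre_build_actual_chain; infer_instance

def pvWitness_build_actual_chain : (List (String × List String)) × String :=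
  ([("a", ["x1", "XOR", "y1"]), ("b", ["x10", "OR", "q"]), ("z0", ["a", "AND", "b"])], "z0")

def Spec_build_actual_chain (rev_operators : List (String × List String)) (output : String) (out : String) : Prop := out = build_actual_chain_alt rev_operators output
instance (rev_operators : List (String × List String)) (output : String) (out : String) : Decidable (Spec_build_actual_chain rev_operators output out) := by unfold Spec_build_actual_chain; infer_instance

-- ===== CLAIM (what is proved, stated in full; the proofs are below) =====
def Claim_equal_build_actual_chain : Prop := ∀ (rev_operators : List (String × List String)) (output : String), Dom_build_actual_chain rev_operators output → Pre_build_actual_chain rev_operators output → Spec_build_actual_chain rev_operators output (build_actual_chain rev_operators output)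

-- ===== LEMMAS AND PROOFS =====

lemma get?_mk_mem {L : List (String × List String)} {w : String} {v : List String}
    (h : (PySem.Dict.mk L).get? w = some v) : (w, v) ∈ L := by
  induction L with
  | nil => simp [PySem.Dict.get?] at h
  | cons p t ih =>
    obtain ⟨k, u⟩ := p
    rw [PySem.Dict.get?_mk_cons] at h
    by_cases hk : k = w
    · subst hk; simp at h; simp [h]
    · simp [hk] at h; exact List.mem_cons_of_mem _ (ih h)

lemma isKey_mem_keys {L : List (String × List String)} {w : String}
    (h : ((PySem.Dict.mk L).get? w).isSome = true) : w ∈ L.map Prod.fst := by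
  cases hg : (PySem.Dict.mk L).get? w with
  | none => rw [hg] at h; simp at h
  | some v => exact List.mem_map.mpr ⟨(w, v), get?_mk_mem hg, rfl⟩

lemma edge_isKey {L : List (String × List String)} {v : String}
    (h : pvIsEdge L v = true) : ((PySem.Dict.mk L).get? v).isSome = true := by
  unfold pvIsEdge at h
  simp only [Bool.and_eq_true] at h
  exact h.2

lemma mem_succs_edge {L : List (String × List String)} {w v : String}
    (h : v ∈ succs L w) : pvIsEdge L v = true := by
  unfold succs at h
  split at h
  · exact (List.mem_filter.mp h).2
  · simp at h

lemma succs_eq {L : List (String × List String)} {w w1 op w2 : String}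
    (h : (PySem.Dict.mk L).get? w = some [w1, op, w2]) :
    succs L w = [w1, w2].filter (pvIsEdge L) := by
  unfold succs; rw [h]

-- the path predicate: A's recursion can walk the wires vs in order starting from w
def PathP (L : List (String × List String)) : String → List String → Prop
  | _, [] => True
  | w, v :: vs => v ∈ succs L w ∧ PathP L v vs

lemma path_append {L : List (String × List String)} :
    ∀ (xs : List String) (w : String) (ys : List String),
      PathP L w (xs ++ ys) ↔ PathP L w xs ∧ PathP L (xs.getLastD w) ys := by
  intro xs
  induction xs with
  | nil => intro w ys; simp [PathP, List.getLastD]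
  | cons x t ih =>
    intro w ys
    simp only [List.cons_append, PathP, List.getLastD_cons, ih]
    tauto

lemma path_nodes {L : List (String × List String)} :
    ∀ (vs : List String) (w v : String), PathP L w vs → v ∈ vs → pvIsEdge L v = true := by
  intro vs
  induction vs with
  | nil => intro w v _ hv; simp at hv
  | cons x t ih =>
    intro w v hp hv
    rcases List.mem_cons.mp hv with h | h
    · subst h; exact mem_succs_edge hp.1
    · exact ih x v hp.2 h

lemma reach_mono {L : List (String × List String)} :
    ∀ (k m : Nat) (w v : String), k ≤ m → v ∈ reachUpTo L k w → v ∈ reachUpTo L m w := by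
  intro k
  induction k with
  | zero => intro m w v _ hv; simp [reachUpTo] at hv
  | succ k ih =>
    intro m w v hkm hv
    obtain ⟨m', rfl⟩ : ∃ m', m = m' + 1 := ⟨m - 1, by omega⟩
    simp only [reachUpTo, List.mem_dedup, List.mem_flatMap] at hv ⊢
    obtain ⟨u, hu, hv⟩ := hv
    refine ⟨u, hu, ?_⟩
    rcases List.mem_cons.mp hv with h | h
    · simp [h]
    · exact List.mem_cons_of_mem _ (ih m' u v (by omega) h)

lemma mem_reach_one {L : List (String × List String)} {w u : String}
    (h : u ∈ succs L w) : u ∈ reachUpTo L 1 w := by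
  simp only [reachUpTo, List.mem_dedup, List.mem_flatMap]
  exact ⟨u, h, List.mem_cons_self⟩

lemma reach_to_path {L : List (String × List String)} :
    ∀ (k : Nat) (w v : String), v ∈ reachUpTo L k w →
      ∃ vs, PathP L w (vs ++ [v]) ∧ vs.length + 1 ≤ k := by
  intro k
  induction k with
  | zero => intro w v hv; simp [reachUpTo] at hv
  | succ k ih =>
    intro w v hv
    simp only [reachUpTo, List.mem_dedup, List.mem_flatMap] at hv
    obtain ⟨u, hu, hv⟩ := hv
    rcases List.mem_cons.mp hv with h | h
    · subst h
      exact ⟨[], ⟨hu, trivial⟩, by simp⟩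
    · obtain ⟨vs, hp, hl⟩ := ih u v h
      exact ⟨u :: vs, ⟨hu, hp⟩, by simpa using Nat.succ_le_succ hl⟩

lemma nodup_path_len {L : List (String × List String)} {w : String} {vs : List String}
    (hnd : vs.Nodup) (hp : PathP L w vs) : vs.length ≤ L.length := by
  have hsub : vs ⊆ L.map Prod.fst := fun x hx =>
    isKey_mem_keys (edge_isKey (path_nodes vs w x hp hx))
  have := (hnd.subperm hsub).length_le
  simpa using this

lemma path_to_reach_easy {L : List (String × List String)} :
    ∀ (vs : List String) (w v : String), PathP L w (vs ++ [v]) →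
      v ∈ reachUpTo L (vs.length + 1) w := by
  intro vs
  induction vs with
  | nil => intro w v hp; simpa using mem_reach_one hp.1
  | cons u t ih =>
    intro w v hp
    simp only [List.length_cons, reachUpTo, List.mem_dedup, List.mem_flatMap]
    exact ⟨u, hp.1, List.mem_cons_of_mem _ (ih u v hp.2)⟩

lemma not_nodup_split {α : Type} [DecidableEq α] :
    ∀ (l : List α), ¬ l.Nodup → ∃ a l1 l2 l3, l = l1 ++ a :: (l2 ++ a :: l3) := by
  intro l
  induction l with
  | nil => intro h; exact absurd List.nodup_nil h
  | cons x t ih =>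
    intro h
    by_cases hx : x ∈ t
    · obtain ⟨s, u, rfl⟩ := List.append_of_mem hx
      exact ⟨x, [], s, u, rfl⟩
    · have ht : ¬ t.Nodup := fun hnd => h (List.nodup_cons.mpr ⟨hx, hnd⟩)
      obtain ⟨a, l1, l2, l3, rfl⟩ := ih ht
      exact ⟨a, x :: l1, l2, l3, rfl⟩

lemma path_to_reach {L : List (String × List String)} :
    ∀ (N : Nat) (vs : List String) (w v : String), vs.length ≤ N →
      PathP L w (vs ++ [v]) → v ∈ reachUpTo L L.length w := by
  intro N
  induction N with
  | zero =>
    intro vs w v hl hp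
    obtain rfl : vs = [] := List.eq_nil_of_length_eq_zero (by omega)
    have hnd : ([] ++ [v] : List String).Nodup := by simp
    have hle := nodup_path_len hnd hp
    exact reach_mono _ _ _ _ (by simpa using hle) (path_to_reach_easy [] w v hp)
  | succ N ih =>
    intro vs w v hl hp
    by_cases hnd : (vs ++ [v]).Nodup
    · have hle := nodup_path_len hnd hp
      simp only [List.length_append, List.length_cons, List.length_nil] at hle
      exact reach_mono _ _ _ _ (by omega) (path_to_reach_easy vs w v hp)
    · obtain ⟨a, l1, l2, l3, heq⟩ := not_nodup_split _ hnd
      rw [heq] at hp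
      rw [path_append] at hp
      obtain ⟨hp1, hp2⟩ := hp
      obtain ⟨ha, hrest⟩ := hp2
      rw [path_append] at hrest
      obtain ⟨_, hp3⟩ := hrest
      obtain ⟨_, hl3⟩ := hp3
      rcases l3.eq_nil_or_concat with h3 | ⟨l3', x, h3⟩
      · -- the second duplicate is the last element: v = a
        subst h3
        have hv : v = a := by
          have h := congrArg List.getLast? heq
          rw [show l1 ++ a :: (l2 ++ a :: ([] : List String)) = (l1 ++ a :: l2) ++ [a] by
            simp] at h
          rw [List.getLast?_concat, List.getLast?_concat] at h
          exact Option.some.inj h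
        subst hv
        have hp' : PathP L w (l1 ++ [v]) := (path_append l1 w [v]).mpr ⟨hp1, ⟨ha, trivial⟩⟩
        have hl1 : l1.length ≤ N := by
          have := congrArg List.length heq
          simp [List.length_append] at this
          omega
        exact ih l1 w v hl1 hp'
      · -- cut the cycle l2 ++ [a] out of the path
        rw [List.concat_eq_append] at h3
        subst h3
        have hv : v = x := by
          have h := congrArg List.getLast? heq
          rw [show l1 ++ a :: (l2 ++ a :: (l3' ++ [x])) = (l1 ++ a :: l2 ++ a :: l3') ++ [x] by
            simp] at h
          rw [List.getLast?_concat, List.getLast?_concat] at h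
          exact Option.some.inj h
        subst hv
        have hl3' : PathP L a (l3' ++ [v]) := hl3
        have hp' : PathP L w ((l1 ++ a :: l3') ++ [v]) := by
          have : PathP L w (l1 ++ (a :: (l3' ++ [v]))) :=
            (path_append l1 w _).mpr ⟨hp1, ⟨ha, hl3'⟩⟩
          simpa using this
        have hl1 : (l1 ++ a :: l3').length ≤ N := by
          have := congrArg List.length heq
          simp [List.length_append] at this ⊢
          omega
        exact ih _ w v hl1 hp'

lemma sat {L : List (String × List String)} {k : Nat} {w v : String}
    (h : v ∈ reachUpTo L k w) : v ∈ reachUpTo L L.length w := by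
  obtain ⟨vs, hp, _⟩ := reach_to_path k w v h
  exact path_to_reach vs.length vs w v le_rfl hp

lemma succ_mem_reach {L : List (String × List String)} {w u : String}
    (h : u ∈ succs L w) : u ∈ reachUpTo L L.length w :=
  sat (mem_reach_one h)

lemma reach_trans_succ {L : List (String × List String)} {w u v : String}
    (hu : u ∈ succs L w) (hv : v ∈ reachUpTo L L.length u) :
    v ∈ reachUpTo L L.length w := by
  apply sat (k := L.length + 1)
  simp only [reachUpTo, List.mem_dedup, List.mem_flatMap]
  exact ⟨u, hu, List.mem_cons_of_mem _ hv⟩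

lemma reach_step {L : List (String × List String)} :
    ∀ (k : Nat) (o v u : String), v ∈ reachUpTo L k o → u ∈ succs L v →
      u ∈ reachUpTo L (k+1) o := by
  intro k
  induction k with
  | zero => intro o v u hv _; simp [reachUpTo] at hv
  | succ k ih =>
    intro o v u hv hu
    simp only [reachUpTo, List.mem_dedup, List.mem_flatMap] at hv ⊢
    obtain ⟨t, ht, hv⟩ := hv
    refine ⟨t, ht, ?_⟩
    rcases List.mem_cons.mp hv with h | h
    · exact List.mem_cons_of_mem _ (reach_mono 1 (k+1) t u (by omega) (mem_reach_one (h ▸ hu)))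
    · exact List.mem_cons_of_mem _ (ih t v u h hu)

lemma R_closed {L : List (String × List String)} {o w u : String}
    (hw : w ∈ Rset L o) (hu : u ∈ succs L w) : u ∈ Rset L o := by
  rcases List.mem_cons.mp hw with h | h
  · subst h; exact List.mem_cons_of_mem _ (succ_mem_reach hu)
  · exact List.mem_cons_of_mem _ (sat (reach_step L.length o w u h hu))

lemma reach_edge {L : List (String × List String)} {k : Nat} {w v : String}
    (h : v ∈ reachUpTo L k w) : pvIsEdge L v = true := by
  obtain ⟨vs, hp, _⟩ := reach_to_path k w v h
  exact path_nodes _ _ _ hp (by simp)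

-- the induction measure: how many wires A's recursion can still reach from w
def rankOf (L : List (String × List String)) (w : String) : Nat :=
  (reachUpTo L L.length w).toFinset.card

lemma pvRank_le {L : List (String × List String)} (w : String) : rankOf L w ≤ L.length := by
  have hsub : (reachUpTo L L.length w).toFinset ⊆ (L.map Prod.fst).toFinset := by
    intro x hx
    rw [List.mem_toFinset] at hx ⊢
    exact isKey_mem_keys (edge_isKey (reach_edge hx))
  calc rankOf L w ≤ (L.map Prod.fst).toFinset.card := Finset.card_le_card hsub
    _ ≤ (L.map Prod.fst).length := List.toFinset_card_le _
    _ = L.length := by simp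

lemma rank_lt {L : List (String × List String)} {o : String}
    (hAcy : ∀ v ∈ Rset L o, v ∉ reachUpTo L L.length v) {w w' : String}
    (hw' : w' ∈ Rset L o) (hs : w' ∈ succs L w) : rankOf L w' < rankOf L w := by
  apply Finset.card_lt_card
  rw [Finset.ssubset_iff_of_subset]
  · refine ⟨w', ?_, ?_⟩
    · rw [List.mem_toFinset]; exact succ_mem_reach hs
    · rw [List.mem_toFinset]; exact hAcy w' hw'
  · intro x hx
    rw [List.mem_toFinset] at hx ⊢
    exact reach_trans_succ hs hx

lemma goodEntry_len {L : List (String × List String)} {v : List String}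
    (h : GoodEntry L v = true) : v.length = 3 := by
  unfold GoodEntry at h
  simp only [Bool.and_eq_true, beq_iff_eq] at h
  exact h.1.1

lemma goA_nonkey {L : List (String × List String)} {w : String}
    (h : (PySem.Dict.mk L).get? w = none) : ∀ f, goA L f w = w := by
  intro f; cases f with
  | zero => rfl
  | succ f => simp [goA, h]

-- an operand A descends into stays in the visited set and strictly drops the measure
lemma operand_facts {L : List (String × List String)} {o : String}
    (hAcy : ∀ v ∈ Rset L o, v ∉ reachUpTo L L.length v)
    {w w1 op w2 w' : String} (hR : w ∈ Rset L o)
    (hget : (PySem.Dict.mk L).get? w = some [w1, op, w2])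
    (hmem : w' = w1 ∨ w' = w2)
    (hx : PySem.Str.startswith w' "x" = false) (hy : PySem.Str.startswith w' "y" = false)
    (hk : ((PySem.Dict.mk L).get? w').isSome = true) :
    w' ∈ Rset L o ∧ rankOf L w' < rankOf L w := by
  have hs : w' ∈ succs L w := by
    rw [succs_eq hget, List.mem_filter]
    constructor
    · rcases hmem with rfl | rfl <;> simp
    · unfold pvIsEdge; rw [hx, hy, hk]; rfl
  have hR' := R_closed hR hs
  exact ⟨hR', rank_lt hAcy hR' hs⟩

-- goA is fuel-irrelevant once the fuel exceeds the measure of every visited key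
lemma goA_fuel {L : List (String × List String)} {o : String}
    (hG : ∀ v ∈ Rset L o, ∀ val, (PySem.Dict.mk L).get? v = some val → GoodEntry L val = true)
    (hAcy : ∀ v ∈ Rset L o, v ∉ reachUpTo L L.length v) :
    ∀ f g w, w ∈ Rset L o → 0 < f →
      (((PySem.Dict.mk L).get? w).isSome = true → rankOf L w < f) →
      0 < g → (((PySem.Dict.mk L).get? w).isSome = true → rankOf L w < g) →
      goA L f w = goA L g w := by
  intro f
  induction f with
  | zero => omega
  | succ f ih =>
    intro g w hR _ hf hg0 hg
    obtain ⟨g', rfl⟩ : ∃ g', g = g' + 1 := ⟨g - 1, by omega⟩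
    cases hget : (PySem.Dict.mk L).get? w with
    | none => simp [goA, hget]
    | some v =>
      have hfw := hf (by simp [hget])
      have hgw := hg (by simp [hget])
      have hGE : GoodEntry L v = true := hG w hR v hget
      have hlen : v.length = 3 := goodEntry_len hGE
      obtain ⟨w1, op, w2, rfl⟩ : ∃ a b c, v = [a, b, c] := by
        rcases v with _ | ⟨a, v⟩; · simp at hlen
        rcases v with _ | ⟨b, v⟩; · simp at hlen
        rcases v with _ | ⟨c, v⟩; · simp at hlen
        rcases v with _ | ⟨d, v⟩; · exact ⟨a, b, c, rfl⟩
        simp at hlen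
      have hrec : ∀ w', (w' = w1 ∨ w' = w2) →
          (if !(PySem.Str.startswith w' "x") && !(PySem.Str.startswith w' "y") then goA L f w' else w')
            = (if !(PySem.Str.startswith w' "x") && !(PySem.Str.startswith w' "y") then goA L g' w' else w') := by
        intro w' hmem
        by_cases hx : PySem.Str.startswith w' "x" = true
        · rw [show (!(PySem.Str.startswith w' "x") && !(PySem.Str.startswith w' "y")) = false from by rw [hx]; rfl,
            if_neg Bool.false_ne_true, if_neg Bool.false_ne_true]
        by_cases hy : PySem.Str.startswith w' "y" = true
        · rw [show (!(PySem.Str.startswith w' "x") && !(PySem.Str.startswith w' "y")) = false from by rw [hy]; exact Bool.and_false _,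
            if_neg Bool.false_ne_true, if_neg Bool.false_ne_true]
        · have hx' := Bool.eq_false_iff.mpr hx
          have hy' := Bool.eq_false_iff.mpr hy
          rw [hx', hy', if_pos (by decide), if_pos (by decide)]
          cases hk : ((PySem.Dict.mk L).get? w').isSome with
          | false =>
            have hnone : (PySem.Dict.mk L).get? w' = none := by
              cases hg2 : (PySem.Dict.mk L).get? w' with
              | none => rfl
              | some _ => rw [hg2] at hk; simp at hk
            rw [goA_nonkey hnone, goA_nonkey hnone]
          | true =>
            obtain ⟨hR', hlt⟩ := operand_facts hAcy hR hget hmem hx' hy' hk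
            exact ih g' w' hR' (by omega) (fun _ => by omega) (by omega) (fun _ => by omega)
      simp only [goA, hget]
      rw [hrec w1 (Or.inl rfl), hrec w2 (Or.inr rfl)]

-- the memo invariant: every cached value is A's value for its key, and cached keys are
-- visited gate wires
def MemoInv (L : List (String × List String)) (o : String) (memo : PySem.Dict String String) : Prop :=
  ∀ k s, memo.get? k = some s →
    k ∈ Rset L o ∧ ((PySem.Dict.mk L).get? k).isSome = true ∧ s = goA L (rankOf L k + 1) k

lemma memoInv_empty (L : List (String × List String)) (o : String) : MemoInv L o PySem.Dict.empty := by
  intro k s h; simp [PySem.Dict.get?_empty] at h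

lemma goB_nonkey {L : List (String × List String)} {o : String} {w : String} {memo : PySem.Dict String String}
    (hI : MemoInv L o memo) (h : (PySem.Dict.mk L).get? w = none) : ∀ f, goB L f w memo = (w, memo) := by
  intro f; cases f with
  | zero => rfl
  | succ f =>
    have hm : memo.get? w = none := by
      cases hm : memo.get? w with
      | none => rfl
      | some s =>
        have := (hI w s hm).2.1
        rw [h] at this; simp at this
    simp [goB, hm, h]

-- main lemma: with enough fuel and a consistent memo, B returns A's value (at canonical
-- fuel rankOf+1) and keeps the memo consistent
lemma goB_main {L : List (String × List String)} {o : String}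
    (hG : ∀ v ∈ Rset L o, ∀ val, (PySem.Dict.mk L).get? v = some val → GoodEntry L val = true)
    (hAcy : ∀ v ∈ Rset L o, v ∉ reachUpTo L L.length v) :
    ∀ f w memo, w ∈ Rset L o → 0 < f →
      (((PySem.Dict.mk L).get? w).isSome = true → rankOf L w < f) → MemoInv L o memo →
      (goB L f w memo).1 = goA L (rankOf L w + 1) w ∧ MemoInv L o (goB L f w memo).2 := by
  intro f
  induction f with
  | zero => omega
  | succ f ih =>
    intro w memo hR _ hf hI
    cases hm : memo.get? w with
    | some s =>
      obtain ⟨_, _, hs⟩ := hI w s hm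
      simp [goB, hm, hs, hI]
    | none =>
      cases hget : (PySem.Dict.mk L).get? w with
      | none =>
        refine ⟨?_, ?_⟩
        · rw [goB_nonkey hI hget, goA_nonkey hget]
        · rw [goB_nonkey hI hget]; exact hI
      | some v =>
        have hfw := hf (by simp [hget])
        have hGE : GoodEntry L v = true := hG w hR v hget
        have hlen : v.length = 3 := goodEntry_len hGE
        obtain ⟨w1, op, w2, rfl⟩ : ∃ a b c, v = [a, b, c] := by
          rcases v with _ | ⟨a, v⟩; · simp at hlen
          rcases v with _ | ⟨b, v⟩; · simp at hlen
          rcases v with _ | ⟨c, v⟩; · simp at hlen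
          rcases v with _ | ⟨d, v⟩; · exact ⟨a, b, c, rfl⟩
          simp at hlen
        -- one operand step of B, compared with A's operand at fuel rankOf L w
        have hstep : ∀ w' memo', MemoInv L o memo' → (w' = w1 ∨ w' = w2) →
            (if PySem.Str.startswith w' "x" || PySem.Str.startswith w' "y" then (w', memo')
               else goB L f w' memo').1
              = (if !(PySem.Str.startswith w' "x") && !(PySem.Str.startswith w' "y")
                   then goA L (rankOf L w) w' else w') ∧
            MemoInv L o (if PySem.Str.startswith w' "x" || PySem.Str.startswith w' "y" then (w', memo')
               else goB L f w' memo').2 := by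
          intro w' memo' hI' hmem
          by_cases hx : PySem.Str.startswith w' "x" = true
          · rw [if_pos (by rw [hx]; rfl), show (!(PySem.Str.startswith w' "x") && !(PySem.Str.startswith w' "y")) = false from by rw [hx]; rfl,
              if_neg Bool.false_ne_true]
            exact ⟨rfl, hI'⟩
          by_cases hy : PySem.Str.startswith w' "y" = true
          · rw [if_pos (by rw [hy]; exact Bool.or_true _), show (!(PySem.Str.startswith w' "x") && !(PySem.Str.startswith w' "y")) = false from by rw [hy]; exact Bool.and_false _,
              if_neg Bool.false_ne_true]
            exact ⟨rfl, hI'⟩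
          · have hx' := Bool.eq_false_iff.mpr hx
            have hy' := Bool.eq_false_iff.mpr hy
            rw [hx', hy', if_neg (by decide), if_pos (by decide)]
            cases hk : ((PySem.Dict.mk L).get? w').isSome with
            | false =>
              have hnone : (PySem.Dict.mk L).get? w' = none := by
                cases hg2 : (PySem.Dict.mk L).get? w' with
                | none => rfl
                | some _ => rw [hg2] at hk; simp at hk
              rw [goB_nonkey hI' hnone]
              exact ⟨(goA_nonkey hnone _).symm, hI'⟩
            | true =>
              obtain ⟨hR', hlt⟩ := operand_facts hAcy hR hget hmem hx' hy' hk
              have h1 := ih w' memo' hR' (by omega) (fun _ => by omega) hI'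
              refine ⟨?_, h1.2⟩
              rw [h1.1]
              exact goA_fuel hG hAcy _ _ _ hR' (by omega) (fun _ => by omega) (by omega) (fun _ => by omega)
        obtain ⟨ha, hI1⟩ := hstep w1 memo hI (Or.inl rfl)
        have hAexp : goA L (rankOf L w + 1) w =
            (let a := if !(PySem.Str.startswith w1 "x") && !(PySem.Str.startswith w1 "y") then goA L (rankOf L w) w1 else w1
             let b := if !(PySem.Str.startswith w2 "x") && !(PySem.Str.startswith w2 "y") then goA L (rankOf L w) w2 else w2
             if PySem.Str.startswith a "x" || PySem.Str.startswith b "x" then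
               pvFmt2d ((PySem.Int.ofStr? (PySem.Str.slice a (some 1) none)).getD 0) ++ op
             else "(" ++ a ++ " " ++ op ++ " " ++ b ++ ")") := by
          simp only [goA, hget, List.getD, List.getElem?_cons_zero, List.getElem?_cons_succ,
            Option.getD_some]
        set memo1 := (if PySem.Str.startswith w1 "x" || PySem.Str.startswith w1 "y" then (w1, memo)
               else goB L f w1 memo).2 with hmemo1
        obtain ⟨hb, hI2⟩ := hstep w2 memo1 hI1 (Or.inr rfl)
        simp only [goB, hm, hget]
        rw [hAexp]
        simp only []
        constructor
        · rw [ha, hb]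
        · -- the returned memo: insert w s on top of a consistent memo
          intro k s' hk
          rw [PySem.Dict.get?_insert] at hk
          by_cases hkw : k = w
          · rw [if_pos hkw] at hk
            obtain rfl := hkw
            refine ⟨hR, by simp [hget], ?_⟩
            rw [hAexp]
            simp only [] at hk ⊢
            rw [ha, hb] at hk
            exact (Option.some_injective _ hk).symm
          · rw [if_neg hkw] at hk
            exact hI2 k s' hk

-- ===== VERDICT (by name: the statement is the Claim_ definition above) =====
theorem build_actual_chain_spec : Claim_equal_build_actual_chain := by
  intro L out _ hpre
  unfold Spec_build_actual_chain build_actual_chain build_actual_chain_alt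
  rcases hpre with h | ⟨_, hcond⟩
  · rw [goA_nonkey h, goB_nonkey (memoInv_empty L out) h]
  · have hG : ∀ v ∈ Rset L out, ∀ val, (PySem.Dict.mk L).get? v = some val → GoodEntry L val = true :=
      fun v hv => (hcond v hv).1
    have hAcy : ∀ v ∈ Rset L out, v ∉ reachUpTo L L.length v := fun v hv => (hcond v hv).2
    have hRout : out ∈ Rset L out := List.mem_cons_self
    have hmain := goB_main hG hAcy (L.length + 1) out PySem.Dict.empty hRout
      (by omega) (fun _ => by have := pvRank_le (L := L) out; omega) (memoInv_empty L out)
    rw [hmain.1]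
    exact goA_fuel hG hAcy _ _ _ hRout (by omega)
      (fun _ => by have := pvRank_le (L := L) out; omega) (by omega)
      (fun _ => by have := pvRank_le (L := L) out; omega)
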